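-- pv_equiv track=rewrite | github.com/rresender/python-samples | fraudulentactivitynotification.py | activityNotifications
-- ===== SOURCE A (Python) =====
-- import bisect
--
-- def median(items, d, mid):
--     if d % 2 == 0:
--         return sum(items[mid - 1:mid + 1]) / 2
--     else :
--         return items[mid]
--
-- def activityNotifications(expenditure, d):
--     n = 0
--     mid = int(d / 2)
--     sub = sorted(expenditure[:d])
--     for i in range(d, len(expenditure)):
--         m = 2 * median(sub, d, mid)
--         if (expenditure[i] >= m):
--             n += 1
--         del sub[bisect.bisect_left(sub, expenditure[i - d])]
--         bisect.insort(sub, expenditure[i])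
--     return n
-- ===== SOURCE B (Python) =====
-- def activityNotifications(expenditure, d):
--     # Recompute each trailing window's sorted order directly (slice + sort),
--     # comparing in exact integer arithmetic; no incremental bisect bookkeeping.
--     mid = d // 2
--     count = 0
--     for i in range(d, len(expenditure)):
--         w = sorted(expenditure[i - d:i])
--         m = w[mid - 1] + w[mid] if d % 2 == 0 else 2 * w[mid]
--         if expenditure[i] >= m:
--             count += 1
--     return count
-- ===== Notes on version B (the rewrite author's own statement) =====
-- stated objective: simpler
-- what changed: B drops A's incrementally maintained sorted list (bisect delete/insort) and float median arithmetic: it re-sorts each trailing d-window from a slice and compares against the doubled median in exact integer arithmetic.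
import Mathlib
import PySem

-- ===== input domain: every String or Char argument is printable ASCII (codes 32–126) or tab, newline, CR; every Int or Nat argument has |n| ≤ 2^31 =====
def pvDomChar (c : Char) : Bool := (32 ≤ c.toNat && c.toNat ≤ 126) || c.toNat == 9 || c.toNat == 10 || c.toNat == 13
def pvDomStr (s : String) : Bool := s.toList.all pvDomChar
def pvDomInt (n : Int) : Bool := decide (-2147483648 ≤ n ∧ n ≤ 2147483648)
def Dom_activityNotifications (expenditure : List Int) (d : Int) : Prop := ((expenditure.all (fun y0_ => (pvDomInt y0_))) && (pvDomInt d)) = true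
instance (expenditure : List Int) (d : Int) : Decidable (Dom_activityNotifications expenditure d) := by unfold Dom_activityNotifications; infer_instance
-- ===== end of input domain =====

-- B replaces A's incrementally maintained bisect list and float median arithmetic with a
-- per-window slice-and-sort comparison in exact integer arithmetic (simpler; not faster).


-- ===== PORT A =====
-- Python's median returns a float; we port m = 2 * median(sub, d, mid) directly, which is an
-- integer: for even d, 2 * (sum(items[mid-1:mid+1]) / 2) = sum(items[mid-1:mid+1]), and the
-- float halving/doubling is exact for the |values| ≤ 2^31 of Dom.
def pvMedian2 (items : List Int) (d mid : Int) : Int :=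
  if PySem.Int.mod d 2 == 0 then (PySem.List.slice items (some (mid - 1)) (some (mid + 1))).sum
  else 2 * PySem.List.pyGetD items mid 0

-- loop body: count update, then `del sub[bisect_left(sub, out)]`, then `bisect.insort(sub, inc)`.
-- Inside Pre_ the bisect_left index is always in range (the outgoing element is in sub), so
-- List.eraseIdx is exact there; Python's IndexError cases (d ≤ 0) are outside Pre_.
def pvStepA (expenditure : List Int) (d mid : Int) (st : Int × List Int) (i : Int) : Int × List Int :=
  let m := pvMedian2 st.2 d mid
  let n := if m ≤ PySem.List.pyGetD expenditure i 0 then st.1 + 1 else st.1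
  let sub := st.2.eraseIdx (PySem.List.bisectLeft st.2 (PySem.List.pyGetD expenditure (i - d) 0))
  let inc := PySem.List.pyGetD expenditure i 0
  (n, PySem.List.insert sub ((PySem.List.bisectRight sub inc : Nat) : Int) inc)

def activityNotifications (expenditure : List Int) (d : Int) : Int :=
  -- mid = int(d / 2): truncating division, equal to d // 2 for d ≥ 0 (A raises for d < 0, outside Pre_)
  let mid := PySem.Int.floordiv d 2
  let sub0 := PySem.List.sorted (PySem.List.slice expenditure none (some d)) (fun x => x)
  ((PySem.List.pyRange d (expenditure.length : Int) 1).foldl (pvStepA expenditure d mid) (0, sub0)).1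

-- ===== PORT B =====
def pvStepB (expenditure : List Int) (d mid : Int) (count : Int) (i : Int) : Int :=
  let w := PySem.List.sorted (PySem.List.slice expenditure (some (i - d)) (some i)) (fun x => x)
  let m := if PySem.Int.mod d 2 == 0
    then PySem.List.pyGetD w (mid - 1) 0 + PySem.List.pyGetD w mid 0
    else 2 * PySem.List.pyGetD w mid 0
  if m ≤ PySem.List.pyGetD expenditure i 0 then count + 1 else count

def activityNotifications_alt (expenditure : List Int) (d : Int) : Int :=
  let mid := PySem.Int.floordiv d 2
  (PySem.List.pyRange d (expenditure.length : Int) 1).foldl (pvStepB expenditure d mid) 0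

-- ===== PRECONDITION & SPEC =====
-- Pre_ is exactly where Python A returns: for d ≤ 0 A raises IndexError (indexing / deleting
-- from an empty or exhausted sub list), except the trivial case d = 0 with an empty list.
def Pre_activityNotifications (expenditure : List Int) (d : Int) : Prop :=
  1 ≤ d ∨ (expenditure = [] ∧ d = 0)
instance (expenditure : List Int) (d : Int) : Decidable (Pre_activityNotifications expenditure d) := by unfold Pre_activityNotifications; infer_instance

def pvWitness_activityNotifications : List Int × Int := ([2, 3, 4, 2, 3, 6, 8, 4, 5], 5)

def Spec_activityNotifications (expenditure : List Int) (d : Int) (out : Int) : Prop := out = activityNotifications_alt expenditure d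
instance (expenditure : List Int) (d : Int) (out : Int) : Decidable (Spec_activityNotifications expenditure d out) := by unfold Spec_activityNotifications; infer_instance

-- ===== CLAIM (what is proved, stated in full; the proofs are below) =====
def Claim_equal_activityNotifications : Prop := ∀ (expenditure : List Int) (d : Int), Dom_activityNotifications expenditure d → Pre_activityNotifications expenditure d → Spec_activityNotifications expenditure d (activityNotifications expenditure d)

-- ===== LEMMAS AND PROOFS =====

def pvWindow (expenditure : List Int) (d i : Int) : List Int :=
  (expenditure.drop (i - d).toNat).take d.toNat

theorem pv_erase_lemma (l : List Int) (x : Int) (hs : l.Pairwise (· ≤ ·)) (hx : x ∈ l) :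
    l.Perm (x :: l.eraseIdx (PySem.List.bisectLeft l x)) ∧
    (l.eraseIdx (PySem.List.bisectLeft l x)).Pairwise (· ≤ ·) := by
  obtain ⟨hle, hlt, hge⟩ := PySem.List.bisectLeft_spec l x hs
  set j := PySem.List.bisectLeft l x with hj
  obtain ⟨k0, hk0, hk0x⟩ := List.mem_iff_getElem.1 hx
  have hmono := List.pairwise_iff_getElem.1 hs
  have hjk0 : j ≤ k0 := by
    by_contra h
    exact absurd hk0x (ne_of_lt (hlt k0 hk0 (lt_of_not_ge h)))
  have hjlt : j < l.length := lt_of_le_of_lt hjk0 hk0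
  have hljx : l[j] = x := by
    rcases Nat.eq_or_lt_of_le hjk0 with h | h
    · simp [h, hk0x]
    · exact le_antisymm (hk0x ▸ hmono j k0 hjlt hk0 h) (hge j hjlt le_rfl)
  constructor
  · have := List.getElem_cons_eraseIdx_perm hjlt
    rw [hljx] at this
    exact this.symm
  · exact List.Pairwise.sublist (List.eraseIdx_sublist l j) hs

theorem pv_insert_lemma (l : List Int) (x : Int) (hs : l.Pairwise (· ≤ ·)) :
    (PySem.List.insert l ((PySem.List.bisectRight l x : Nat) : Int) x).Perm (x :: l) ∧
    (PySem.List.insert l ((PySem.List.bisectRight l x : Nat) : Int) x).Pairwise (· ≤ ·) := by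
  obtain ⟨hle, hlt, hge⟩ := PySem.List.bisectRight_spec l x hs
  set j := PySem.List.bisectRight l x with hj
  rw [PySem.List.insert_natCast l j x hle]
  have hmono := List.pairwise_iff_getElem.1 hs
  have htake : ∀ a ∈ l.take j, a ≤ x := by
    intro a ha
    obtain ⟨k, hk, hka⟩ := List.mem_iff_getElem.1 ha
    rw [List.getElem_take] at hka
    have hkj : k < j := lt_of_lt_of_le hk (by simp)
    exact hka ▸ hlt k (lt_of_lt_of_le hkj hle) hkj
  have hdrop : ∀ b ∈ l.drop j, x ≤ b := by
    intro b hb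
    obtain ⟨k, hk, hkb⟩ := List.mem_iff_getElem.1 hb
    rw [List.getElem_drop] at hkb
    have hk2 : j + k < l.length := by simp [List.length_drop] at hk; omega
    exact hkb ▸ le_of_lt (hge (j + k) hk2 (by omega))
  constructor
  · have := List.perm_middle (a := x) (l₁ := l.take j) (l₂ := l.drop j)
    rwa [List.take_append_drop] at this
  · rw [List.pairwise_append]
    refine ⟨List.Pairwise.sublist (List.take_sublist j l) hs, ?_, ?_⟩
    · rw [List.pairwise_cons]
      exact ⟨hdrop, List.Pairwise.sublist (List.drop_sublist j l) hs⟩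
    · intro a ha b hb
      rcases List.mem_cons.1 hb with rfl | hb'
      · exact htake a ha
      · exact le_trans (htake a ha) (hdrop b hb')

-- window decompositions
theorem pv_window_cons (expenditure : List Int) (d i : Int) (hd : 1 ≤ d) (hi : d ≤ i)
    (hil : i < (expenditure.length : Int)) :
    pvWindow expenditure d i
      = expenditure[(i - d).toNat]'(by omega)
        :: (expenditure.drop ((i - d).toNat + 1)).take (d.toNat - 1) := by
  unfold pvWindow
  rw [List.drop_eq_getElem_cons (by omega)]
  have : d.toNat = (d.toNat - 1) + 1 := by omega
  rw [this, List.take_succ_cons]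
  simp

theorem pv_window_snoc (expenditure : List Int) (d i : Int) (hd : 1 ≤ d) (hi : d ≤ i)
    (hil : i < (expenditure.length : Int)) :
    pvWindow expenditure d (i + 1)
      = (expenditure.drop ((i - d).toNat + 1)).take (d.toNat - 1) ++ [expenditure[i.toNat]'(by omega)] := by
  unfold pvWindow
  have h1 : (i + 1 - d).toNat = (i - d).toNat + 1 := by omega
  rw [h1]
  have h2 : d.toNat = (d.toNat - 1) + 1 := by omega
  rw [h2, List.take_add_one, List.getElem?_drop,
      show (i - d).toNat + 1 + (d.toNat - 1) = i.toNat by omega,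
      List.getElem?_eq_getElem (by omega)]
  simp

theorem pv_step_sub (expenditure : List Int) (d i n₀ : Int) (hd : 1 ≤ d) (hi : d ≤ i)
    (hil : i < (expenditure.length : Int)) :
    (pvStepA expenditure d (PySem.Int.floordiv d 2)
        (n₀, PySem.List.sorted (pvWindow expenditure d i) (fun x => x)) i).2
      = PySem.List.sorted (pvWindow expenditure d (i + 1)) (fun x => x) := by
  set W := pvWindow expenditure d i with hW
  set sub := PySem.List.sorted W (fun x => x) with hsub
  have hsorted : sub.Pairwise (· ≤ ·) := by
    have := PySem.List.sorted_pairwise (xs := W) (key := fun x => x)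
    simpa using this
  have hperm : sub.Perm W := PySem.List.sorted_perm W (fun x => x) false
  have hout : PySem.List.pyGetD expenditure (i - d) 0 = expenditure[(i - d).toNat]'(by omega) := by
    exact PySem.List.pyGetD_eq_getElem _ _ (by omega) (by omega)
  have hinc : PySem.List.pyGetD expenditure i 0 = expenditure[i.toNat]'(by omega) := by
    exact PySem.List.pyGetD_eq_getElem _ _ (by omega) (by omega)
  set out := expenditure[(i - d).toNat]'(by omega) with hox
  set inc := expenditure[i.toNat]'(by omega) with hincv
  set tl := (expenditure.drop ((i - d).toNat + 1)).take (d.toNat - 1) with htl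
  have hWc : W = out :: tl := pv_window_cons expenditure d i hd hi hil
  have hmem : out ∈ sub := (PySem.List.mem_sorted _ _ _ _).2 (by rw [hWc]; exact List.mem_cons_self)
  obtain ⟨hep, hes⟩ := pv_erase_lemma sub out hsorted hmem
  set e := sub.eraseIdx (PySem.List.bisectLeft sub out) with he
  obtain ⟨hip, his⟩ := pv_insert_lemma e inc hes
  have hetl : e.Perm tl := by
    have h1 : (out :: e).Perm (out :: tl) := hep.symm.trans (hperm.trans (by rw [hWc]))
    exact (List.Perm.cons_inv h1)
  have hfinal : (PySem.List.insert e ((PySem.List.bisectRight e inc : Nat) : Int)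
      inc).Perm (pvWindow expenditure d (i + 1)) := by
    rw [pv_window_snoc expenditure d i hd hi hil]
    refine hip.trans ?_
    refine List.Perm.trans ?_ (List.perm_append_singleton _ _).symm
    exact List.Perm.cons _ hetl
  have := PySem.List.sorted_id_eq_of_perm_of_pairwise (pvWindow expenditure d (i + 1)) _ hfinal his
  simp only [pvStepA, hout, hinc]
  rw [← this]

theorem pv_sum_two (l : List Int) (p : Nat) (h : p + 1 < l.length) :
    (List.take 2 (List.drop p l)).sum = l[p] + l[p + 1] := by
  have h1 : List.drop p l = l[p] :: List.drop (p + 1) l := List.drop_eq_getElem_cons (by omega)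
  have h2 : List.drop (p + 1) l = l[p + 1] :: List.drop (p + 2) l := List.drop_eq_getElem_cons (by omega)
  rw [h1, h2, List.take_succ_cons, List.take_succ_cons, List.take_zero]
  simp

theorem pv_step_count (expenditure : List Int) (d i n₀ : Int) (hd : 1 ≤ d) (hi : d ≤ i)
    (hil : i < (expenditure.length : Int)) :
    (pvStepA expenditure d (PySem.Int.floordiv d 2)
        (n₀, PySem.List.sorted (pvWindow expenditure d i) (fun x => x)) i).1
      = pvStepB expenditure d (PySem.Int.floordiv d 2) n₀ i := by
  have hslice : PySem.List.slice expenditure (some (i - d)) (some i) = pvWindow expenditure d i := by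
    rw [PySem.List.slice_toNat expenditure (by omega) (by omega)]
    unfold pvWindow
    rw [show i.toNat - (i - d).toNat = d.toNat by omega]
  set W := pvWindow expenditure d i with hW
  set sub := PySem.List.sorted W (fun x => x) with hsub
  have hlen : sub.length = d.toNat := by
    rw [hsub, PySem.List.length_sorted, hW]
    unfold pvWindow
    simp
    omega
  simp only [pvStepA, pvStepB, pvMedian2, hslice, ← hsub]
  by_cases hmod : PySem.Int.mod d 2 = 0
  · simp only [hmod, beq_self_eq_true, if_true]
    obtain ⟨c, hc⟩ := (PySem.Int.mod_eq_zero_iff_dvd d 2).1 hmod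
    have hcpos : 1 ≤ c := by omega
    have hmid : PySem.Int.floordiv d 2 = c := by
      rw [PySem.Int.floordiv_eq_ediv_of_pos (by norm_num), hc, Int.mul_ediv_cancel_left _ (by norm_num)]
    rw [hmid]
    have hlt2 : (c - 1).toNat + 1 < sub.length := by omega
    have hA : (PySem.List.slice sub (some (c - 1)) (some (c + 1))).sum
        = sub[(c - 1).toNat]'(by omega) + sub[(c - 1).toNat + 1]'hlt2 := by
      rw [PySem.List.slice_toNat sub (by omega) (by omega),
          show (c + 1).toNat - (c - 1).toNat = 2 by omega]
      exact pv_sum_two sub (c - 1).toNat hlt2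
    rw [hA]
    rw [show PySem.List.pyGetD sub (c - 1) 0 = sub[(c - 1).toNat]'(by omega) from
        PySem.List.pyGetD_eq_getElem _ _ (by omega) (by omega)]
    rw [show PySem.List.pyGetD sub c 0 = sub[(c - 1).toNat + 1]'hlt2 from by
        rw [PySem.List.pyGetD_eq_getElem _ _ (by omega) (by omega)]
        exact getElem_congr (c := sub) rfl (by omega) (by omega)]
  · have hnd : ¬ (2 ∣ d) := fun h => hmod ((PySem.Int.mod_eq_zero_iff_dvd d 2).2 h)
    simp [hnd]

theorem pv_loop (expenditure : List Int) (d : Int) (hd : 1 ≤ d) :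
    ∀ (k : Nat) (i n₀ : Int), d ≤ i → i + (k : Int) = (expenditure.length : Int) →
    ((PySem.List.pyRange i (expenditure.length : Int) 1).foldl
        (pvStepA expenditure d (PySem.Int.floordiv d 2))
        (n₀, PySem.List.sorted (pvWindow expenditure d i) (fun x => x))).1
      = (PySem.List.pyRange i (expenditure.length : Int) 1).foldl
          (pvStepB expenditure d (PySem.Int.floordiv d 2)) n₀ := by
  intro k
  induction k with
  | zero =>
    intro i n₀ hi hlen
    rw [PySem.List.pyRange_one_eq_nil (by omega)]
    rfl
  | succ k ih =>
    intro i n₀ hi hlen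
    have hil : i < (expenditure.length : Int) := by push_cast at hlen; omega
    rw [PySem.List.pyRange_one_cons hil]
    simp only [List.foldl_cons]
    have hpair : pvStepA expenditure d (PySem.Int.floordiv d 2)
        (n₀, PySem.List.sorted (pvWindow expenditure d i) (fun x => x)) i
        = (pvStepB expenditure d (PySem.Int.floordiv d 2) n₀ i,
           PySem.List.sorted (pvWindow expenditure d (i + 1)) (fun x => x)) := by
      have h1 := pv_step_count expenditure d i n₀ hd hi hil
      have h2 := pv_step_sub expenditure d i n₀ hd hi hil
      exact Prod.ext h1 h2
    rw [hpair]
    exact ih (i + 1) _ (by omega) (by push_cast at hlen ⊢; omega)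

theorem pv_main (expenditure : List Int) (d : Int) (hd : 1 ≤ d) :
    activityNotifications expenditure d = activityNotifications_alt expenditure d := by
  unfold activityNotifications activityNotifications_alt
  simp only []
  have hw : PySem.List.slice expenditure none (some d) = pvWindow expenditure d d := by
    rw [PySem.List.slice_to expenditure (by omega)]
    unfold pvWindow
    rw [show (d - d).toNat = 0 by omega, List.drop_zero]
  by_cases hle : (expenditure.length : Int) ≤ d
  · rw [PySem.List.pyRange_one_eq_nil hle]
    rfl
  · rw [hw]
    exact pv_loop expenditure d hd (expenditure.length - d.toNat) d 0 le_rfl (by omega)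

-- ===== VERDICT (by name: the statement is the Claim_ definition above) =====
theorem activityNotifications_spec : Claim_equal_activityNotifications := by
  intro expenditure d _ hpre
  unfold Spec_activityNotifications
  rcases hpre with hd | ⟨he, hd0⟩
  · exact pv_main expenditure d hd
  · subst he; subst hd0; rfl
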